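-- pv_equiv track=rewrite | github.com/AdelBashiroff/- | ClassWork44_task1.py | max_equal_run_length
-- ===== SOURCE A (Python) =====
-- def max_equal_run_length(A):
--     if not A:
--         return 0
--     max_len = 1
--     current_len = 1
--     for i in range(1, len(A)):
--         if A[i] == A[i - 1]:
--             current_len += 1
--             max_len = max(max_len, current_len)
--         else:
--             current_len = 1
--     return max_len
-- ===== SOURCE B (Python) =====
-- from itertools import groupby
--
--
-- def max_equal_run_length(A):
--     # group the sequence into maximal runs of equal consecutive elements,
--     # take the length of each run, return the maximum (0 for empty input)
--     return max((sum(1 for _ in g) for _, g in groupby(A)), default=0)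
-- ===== Notes on version B (the rewrite author's own statement) =====
-- stated objective: idiomatic
-- what changed: Replaces the explicit index loop with its max_len/current_len running state by itertools.groupby: partition into maximal runs, map each run to its length, take the max with default 0.
import Mathlib
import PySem

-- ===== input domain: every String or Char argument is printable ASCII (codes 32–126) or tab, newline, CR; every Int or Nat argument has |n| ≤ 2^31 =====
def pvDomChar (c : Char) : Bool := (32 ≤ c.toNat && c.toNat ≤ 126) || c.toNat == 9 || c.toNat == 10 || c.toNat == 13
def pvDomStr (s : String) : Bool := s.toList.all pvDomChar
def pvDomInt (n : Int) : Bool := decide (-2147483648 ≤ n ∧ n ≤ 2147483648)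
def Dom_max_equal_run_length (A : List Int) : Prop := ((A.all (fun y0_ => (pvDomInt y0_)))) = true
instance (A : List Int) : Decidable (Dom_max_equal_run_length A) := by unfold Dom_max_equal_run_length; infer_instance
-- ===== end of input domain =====

-- B replaces A's index loop and max_len/current_len state by a group-into-runs
-- then map-length then max decomposition (idiomatic, same O(n) cost).

-- ===== PORT A =====
-- the body of A's 'for i in range(1, len(A))' loop
def pvStepA (A : List Int) (s : Int × Int) (i : Int) : Int × Int :=
  if PySem.List.pyGetD A i 0 = PySem.List.pyGetD A (i - 1) 0 then
    (max s.1 (s.2 + 1), s.2 + 1)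
  else
    (s.1, 1)

def max_equal_run_length (A : List Int) : Int :=
  if A = [] then 0
  else ((PySem.List.pyRange 1 (A.length : Int) 1).foldl (pvStepA A) (1, 1)).1

-- ===== PORT B =====
-- lengths of the maximal runs of equal consecutive elements (itertools.groupby)
def pvRunLens : List Int → List Int
  | [] => []
  | [_] => [1]
  | x :: y :: xs =>
    let r := pvRunLens (y :: xs)
    if x = y then (r.headD 0 + 1) :: r.tail else 1 :: r

def max_equal_run_length_alt (A : List Int) : Int :=
  (pvRunLens A).foldl max 0

-- ===== PRECONDITION & SPEC =====
def Spec_max_equal_run_length (A : List Int) (out : Int) : Prop := out = max_equal_run_length_alt A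
instance (A : List Int) (out : Int) : Decidable (Spec_max_equal_run_length A out) := by unfold Spec_max_equal_run_length; infer_instance

-- ===== CLAIM (what is proved, stated in full; the proofs are below) =====
def Claim_equal_max_equal_run_length : Prop := ∀ (A : List Int), Dom_max_equal_run_length A → Spec_max_equal_run_length A (max_equal_run_length A)

-- ===== LEMMAS AND PROOFS =====

-- A's loop re-expressed as a recursion over the suffix, carrying the previous element
def pvLoopPair (prev : Int) : List Int → Int × Int → Int × Int
  | [], s => s
  | y :: ys, s =>
    pvLoopPair y ys (if y = prev then (max s.1 (s.2 + 1), s.2 + 1) else (s.1, 1))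

lemma pvLoop_shift (A : List Int) :
    ∀ (suf pre : List Int) (x : Int) (s : Int × Int), A = pre ++ x :: suf →
      ((PySem.List.pyRange ((pre.length : Int) + 1) (A.length : Int) 1).foldl (pvStepA A) s)
        = pvLoopPair x suf s := by
  intro suf
  induction suf with
  | nil =>
    intro pre x s hA
    have hlen : (A.length : Int) = (pre.length : Int) + 1 := by
      subst hA; simp
    rw [hlen, PySem.List.pyRange_one_eq_nil (by omega)]
    simp [pvLoopPair]
  | cons y ys ih =>
    intro pre x s hA
    have hlen : (A.length : Int) = (pre.length : Int) + 2 + (ys.length : Int) := by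
      subst hA; simp; push_cast; ring
    rw [PySem.List.pyRange_one_cons (by omega)]
    simp only [List.foldl_cons]
    have hx : PySem.List.pyGetD A ((pre.length : Int) + 1 - 1) 0 = x := by
      have : ((pre.length : Int) + 1 - 1) = ((pre.length : Nat) : Int) := by omega
      rw [this, PySem.List.pyGetD_natCast]
      subst hA
      simp [List.getD]
    have hy : PySem.List.pyGetD A ((pre.length : Int) + 1) 0 = y := by
      have : ((pre.length : Int) + 1) = ((pre.length + 1 : Nat) : Int) := by push_cast; ring
      rw [this, PySem.List.pyGetD_natCast]
      subst hA
      simp [List.getD]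
    have hA' : A = (pre ++ [x]) ++ y :: ys := by simp [hA]
    have := ih (pre ++ [x]) y (if y = x then (max s.1 (s.2 + 1), s.2 + 1) else (s.1, 1)) hA'
    simp only [List.length_append, List.length_cons, List.length_nil] at this
    have hc : ((pre.length + 1 : Nat) : Int) = (pre.length : Int) + 1 := by push_cast; ring
    rw [hc] at this
    rw [pvStepA, hx, hy]
    simp only [pvLoopPair]
    by_cases hxy : y = x
    · simp [hxy] at this ⊢; exact this
    · simp [hxy] at this ⊢; exact this

-- pvRunLens of a nonempty list is a cons with positive head
lemma pvRunLens_cons (x : Int) (xs : List Int) :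
    ∃ h t, pvRunLens (x :: xs) = h :: t ∧ 1 ≤ h := by
  induction xs generalizing x with
  | nil => exact ⟨1, [], rfl, le_refl 1⟩
  | cons y ys ih =>
    obtain ⟨h, t, heq, hpos⟩ := ih y
    by_cases hxy : x = y
    · exact ⟨h + 1, t, by simp [pvRunLens, hxy, heq], by omega⟩
    · exact ⟨1, h :: t, by simp [pvRunLens, hxy, heq], le_refl 1⟩

-- core invariant: A's pair loop computes the max of m and the run lengths,
-- with the first run extended by the c-1 equal elements already counted
lemma pvLoop_key :
    ∀ (ys : List Int) (prev m c : Int), 1 ≤ c → c ≤ m →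
      (pvLoopPair prev ys (m, c)).1
        = max m ((((pvRunLens (prev :: ys)).headD 0 + (c - 1)) ::
                 (pvRunLens (prev :: ys)).tail).foldl max 0) := by
  intro ys
  induction ys with
  | nil =>
    intro prev m c h1 h2
    simp only [pvLoopPair, pvRunLens]
    have : max (0 : Int) (1 + (c - 1)) = c := by omega
    simp [this]
    omega
  | cons y ys ih =>
    intro prev m c h1 h2
    obtain ⟨h, t, heq, hpos⟩ := pvRunLens_cons y ys
    simp only [pvLoopPair]
    by_cases hxy : y = prev
    · subst hxy
      have hr : pvRunLens (y :: y :: ys) = (h + 1) :: t := by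
        simp [pvRunLens, heq]
      simp only [if_true]
      rw [ih y (max m (c + 1)) (c + 1) (by omega) (by omega), heq, hr]
      simp only [List.headD_cons, List.tail_cons]
      have harg : h + (c + 1 - 1) = h + 1 + (c - 1) := by ring
      rw [harg]
      have hF := (PySem.List.le_foldl_max t (max 0 (h + 1 + (c - 1)))).1
      simp only [List.foldl_cons]
      omega
    · have hr : pvRunLens (prev :: y :: ys) = 1 :: h :: t := by
        simp [pvRunLens, heq, Ne.symm hxy]
      simp only [if_neg hxy]
      rw [ih y m 1 (le_refl 1) (by omega), heq, hr]
      simp only [List.headD_cons, List.tail_cons, List.foldl_cons]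
      have h0 : h + (1 - 1 : Int) = h := by ring
      rw [h0]
      have hassoc : ∀ (a b : Int), t.foldl max (max a b) = max a (t.foldl max b) := by
        intro a b
        exact List.foldl_assoc (op := max) (l := t) (a₁ := a) (a₂ := b)
      have e1 : max (max (0 : Int) (1 + (c - 1))) h = max c (max 0 h) := by omega
      rw [e1, hassoc c (max 0 h)]
      omega

-- ===== VERDICT (by name: the statement is the Claim_ definition above) =====
theorem max_equal_run_length_spec : Claim_equal_max_equal_run_length := by
  intro A _
  unfold Spec_max_equal_run_length max_equal_run_length max_equal_run_length_alt
  cases A with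
  | nil => simp [pvRunLens]
  | cons x xs =>
    simp only [if_neg (List.cons_ne_nil x xs)]
    have h0 : ((([] : List Int)).length : Int) + 1 = 1 := by simp
    have := pvLoop_shift (x :: xs) xs [] x (1, 1) rfl
    rw [h0] at this
    rw [this, pvLoop_key xs x 1 1 (le_refl 1) (le_refl 1)]
    obtain ⟨h, t, heq, hpos⟩ := pvRunLens_cons x xs
    rw [heq]
    simp only [List.headD_cons, List.tail_cons, List.foldl_cons]
    have h0' : h + (1 - 1 : Int) = h := by ring
    rw [h0']
    have hF := (PySem.List.le_foldl_max t (max 0 h)).1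
    omega
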